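-- pv_equiv track=rewrite | github.com/EsterAdinolfi/Progetto_AeSD_Adinolfi_Facchetti | da_eseguire/utility.py | get_column_vectors
-- ===== SOURCE A (Python) =====
-- from typing import List, Tuple, Dict
--
-- def get_column_vectors(rows: List[List[int]]) -> Tuple[List[int], List[int]]:
--     """
--     Converte la matrice in vettori colonna (bitmask) e rimuove colonne vuote.
--
--     Args:
--         rows: matrice binaria (lista di liste)
--
--     Returns:
--         Tupla (col_vectors, col_map) dove:
--         - col_vectors: lista di bitmask delle righe per ogni colonna non vuota
--         - col_map: mapping da indice ridotto a indice originale
--     """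
--     if not rows:
--         return [], []
--     num_rows = len(rows)
--     num_cols_original = len(rows[0])
--     col_vectors = []
--     col_map = []
--     for j in range(num_cols_original):
--         v = 0
--         for i in range(num_rows):
--             if rows[i][j] == 1:
--                 v |= (1 << i)
--
--         if v != 0:
--             col_vectors.append(v)
--             col_map.append(j)
--     return col_vectors, col_map
-- ===== SOURCE B (Python) =====
-- def get_column_vectors(rows):
--     """Sparse one-pass: a dict keyed by column collects bitmasks only for
--     columns that actually contain a 1; sorted keys give the column map."""
--     if not rows:
--         return [], []
--     num_cols = len(rows[0])
--     masks = {}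
--     for i, row in enumerate(rows):
--         for j, x in enumerate(row[:num_cols]):
--             if x == 1:
--                 masks[j] = masks.get(j, 0) | (1 << i)
--     col_map = sorted(masks)
--     return [masks[j] for j in col_map], col_map
-- ===== Notes on version B (the rewrite author's own statement) =====
-- stated objective: alternative
-- what changed: A recomputes each column's bitmask with a dedicated inner scan over all rows and filters zero columns afterwards; B makes one row-major pass that records bits only for columns actually containing a 1 in a sparse dict keyed by column, so the zero-column filter disappears (nonzero columns are exactly the dict keys) and the column map is obtained by sorting the keys.
import Mathlib
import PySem

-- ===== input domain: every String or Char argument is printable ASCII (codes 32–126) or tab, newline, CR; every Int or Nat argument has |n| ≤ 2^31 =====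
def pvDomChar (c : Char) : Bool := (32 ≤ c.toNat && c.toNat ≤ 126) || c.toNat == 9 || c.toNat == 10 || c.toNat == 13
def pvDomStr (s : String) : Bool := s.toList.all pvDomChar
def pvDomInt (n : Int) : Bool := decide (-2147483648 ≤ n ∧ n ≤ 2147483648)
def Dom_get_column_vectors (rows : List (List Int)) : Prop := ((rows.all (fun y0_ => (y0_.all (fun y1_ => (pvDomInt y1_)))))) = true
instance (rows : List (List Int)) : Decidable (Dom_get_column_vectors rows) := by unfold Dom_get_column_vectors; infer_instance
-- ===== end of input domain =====

-- A recomputes each column's bitmask by a dedicated scan over all rows and filters out zero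
-- columns afterwards; B makes one row-major pass collecting bits in a sparse dict keyed by
-- column (only columns containing a 1 ever get a key) and sorts the keys (objective: alternative).
-- ===== PORT A =====
-- rows[i][j] (indices from range, hence in range under Pre_)
def pvAt (rows : List (List Int)) (i j : Nat) : Int :=
  PySem.List.pyGetD (PySem.List.pyGetD rows (i : Int) []) (j : Int) 0

def get_column_vectors (rows : List (List Int)) : List Int × List Int :=
  if rows = [] then ([], [])
  else
    let num_rows := rows.length
    let num_cols_original := (PySem.List.pyGetD rows (0 : Int) []).length
    (List.range num_cols_original).foldl
      (fun (acc : List Int × List Int) j =>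
        let v := (List.range num_rows).foldl
          (fun v i => if pvAt rows i j = 1 then PySem.Int.bor v ((1 : Int) <<< i) else v) 0
        if v ≠ 0 then (acc.1 ++ [v], acc.2 ++ [(j : Int)]) else acc)
      ([], [])

-- ===== PORT B =====
-- enumerate indices i, j are ≥ 0, so '1 << i' is ported with '.toNat' (exact: i comes from enumerate);
-- masks[j] in the final comprehension is ported as getD (j is a key of masks, so no KeyError).
def get_column_vectors_alt (rows : List (List Int)) : List Int × List Int :=
  if rows = [] then ([], [])
  else
    let num_cols := (PySem.List.pyGetD rows (0 : Int) []).length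
    let masks := (PySem.List.enumerate rows 0).foldl
      (fun (d : PySem.Dict Int Int) p =>
        (PySem.List.enumerate (PySem.List.slice p.2 none (some (num_cols : Int))) 0).foldl
          (fun d (q : Int × Int) =>
            if q.2 = 1 then d.insert q.1 (PySem.Int.bor (d.getD q.1 0) ((1 : Int) <<< p.1.toNat))
            else d)
          d)
      PySem.Dict.empty
    let col_map := PySem.List.sorted masks.keys (fun x => x) false
    (col_map.map (fun j => masks.getD j 0), col_map)

-- ===== PRECONDITION & SPEC =====
-- Pre_ excludes exactly the ragged matrices on which Python A raises IndexError
-- (some row shorter than the first row); B truncates rows to the first row's width there.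
def Pre_get_column_vectors (rows : List (List Int)) : Prop :=
  ∀ r ∈ rows, (rows.headD []).length ≤ r.length
instance (rows : List (List Int)) : Decidable (Pre_get_column_vectors rows) := by
  unfold Pre_get_column_vectors; infer_instance
def pvWitness_get_column_vectors : List (List Int) := [[1, 0, 1], [0, 0, 1]]

def Spec_get_column_vectors (rows : List (List Int)) (out : List Int × List Int) : Prop := out = get_column_vectors_alt rows
instance (rows : List (List Int)) (out : List Int × List Int) : Decidable (Spec_get_column_vectors rows out) := by unfold Spec_get_column_vectors; infer_instance

-- ===== CLAIM (what is proved, stated in full; the proofs are below) =====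
def Claim_equal_get_column_vectors : Prop := ∀ (rows : List (List Int)), Dom_get_column_vectors rows → Pre_get_column_vectors rows → Spec_get_column_vectors rows (get_column_vectors rows)

-- ===== LEMMAS AND PROOFS =====

-- A's column bitmask after the first n rows (exactly A's inner fold)
def pvColv (rows : List (List Int)) (n j : Nat) : Int :=
  (List.range n).foldl (fun v i => if pvAt rows i j = 1 then PySem.Int.bor v ((1 : Int) <<< i) else v) 0

-- B's dict after the first n rows, in range/getD form (bridged to the port's enumerate form below)
def pvStepB (rows : List (List Int)) (C : Nat) (d : PySem.Dict Int Int) (i : Nat) : PySem.Dict Int Int :=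
  (PySem.List.enumerate ((PySem.List.pyGetD rows (i : Int) []).take C) 0).foldl
    (fun d (q : Int × Int) =>
      if q.2 = 1 then d.insert q.1 (PySem.Int.bor (d.getD q.1 0) ((1 : Int) <<< i)) else d) d
def pvMasks (rows : List (List Int)) (C n : Nat) : PySem.Dict Int Int :=
  (List.range n).foldl (pvStepB rows C) PySem.Dict.empty

theorem pvOneShl (n : Nat) : (1 : Int) <<< n = ((1 <<< n : Nat) : Int) := Int.mem_toNat?.mp rfl

theorem pvBorPos (v : Int) (n : Nat) (h : 0 ≤ v) :
    PySem.Int.bor v ((1 : Int) <<< n) ≠ 0 ∧ 0 ≤ PySem.Int.bor v ((1 : Int) <<< n) := by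
  rw [pvOneShl, PySem.Int.bor_of_nonneg h (Int.natCast_nonneg _)]
  have hpos : 0 < (1 <<< n : Nat) := by simp [Nat.one_shiftLeft]
  have hle : (1 <<< n : Nat) ≤ v.toNat ||| ((1 <<< n : Nat) : Int).toNat := by
    rw [Int.toNat_natCast]; exact Nat.right_le_or
  have hlt : 0 < v.toNat ||| ((1 <<< n : Nat) : Int).toNat := lt_of_lt_of_le hpos hle
  exact ⟨by exact_mod_cast hlt.ne', Int.natCast_nonneg _⟩

theorem pvColv_succ (rows : List (List Int)) (n j : Nat) :
    pvColv rows (n + 1) j =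
      if pvAt rows n j = 1 then PySem.Int.bor (pvColv rows n j) ((1 : Int) <<< n)
      else pvColv rows n j := by
  simp [pvColv, List.range_succ]

theorem pvColv_nonneg (rows : List (List Int)) (n j : Nat) : 0 ≤ pvColv rows n j := by
  induction n with
  | zero => simp [pvColv]
  | succ n ih =>
    rw [pvColv_succ]
    split
    · exact (pvBorPos _ _ ih).2
    · exact ih

-- one pass of B's inner loop, characterised on get? (indices in enumerate are distinct)
theorem pvInnerGet (i : Nat) (xs : List Int) :
    ∀ (s : Int) (d : PySem.Dict Int Int) (k : Int),
    ((PySem.List.enumerate xs s).foldl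
        (fun d (q : Int × Int) => if q.2 = 1 then d.insert q.1 (PySem.Int.bor (d.getD q.1 0) ((1 : Int) <<< i)) else d)
        d).get? k =
      if ∃ jn : Nat, jn < xs.length ∧ k = s + (jn : Int) ∧ xs[jn]! = 1
      then some (PySem.Int.bor (d.getD k 0) ((1 : Int) <<< i))
      else d.get? k := by
  induction xs with
  | nil => intro s d k; simp [PySem.List.enumerate_nil]
  | cons x xs ih =>
    intro s d k
    rw [PySem.List.enumerate_cons, List.foldl_cons, ih]
    by_cases hk : k = s
    · subst hk
      have hL : ¬ ∃ jn : Nat, jn < xs.length ∧ k = k + 1 + (jn : Int) ∧ xs[jn]! = 1 := by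
        rintro ⟨jn, -, h, -⟩; omega
      rw [if_neg hL]
      by_cases hx : x = 1
      · have hR : ∃ jn : Nat, jn < (x :: xs).length ∧ k = k + (jn : Int) ∧ (x :: xs)[jn]! = 1 :=
          ⟨0, by simp, by simp, by simpa using hx⟩
        rw [if_pos hR, if_pos hx, PySem.Dict.get?_insert_self]
      · have hR : ¬ ∃ jn : Nat, jn < (x :: xs).length ∧ k = k + (jn : Int) ∧ (x :: xs)[jn]! = 1 := by
        -- the only candidate index is 0, where the value is x ≠ 1
          rintro ⟨jn, hlt, he, hv⟩
          have hjn : jn = 0 := by omega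
          subst hjn
          exact hx (by simpa using hv)
        rw [if_neg hR, if_neg hx]
    · have hstep1 :
          (if x = 1 then d.insert s (PySem.Int.bor (d.getD s 0) ((1 : Int) <<< i)) else d).getD k 0
            = d.getD k 0 := by
        split
        · exact PySem.Dict.getD_insert_of_ne _ _ _ hk
        · rfl
      have hstep2 :
          (if x = 1 then d.insert s (PySem.Int.bor (d.getD s 0) ((1 : Int) <<< i)) else d).get? k
            = d.get? k := by
        split
        · exact PySem.Dict.get?_insert_of_ne _ _ hk
        · rfl
      have hcond : (∃ jn : Nat, jn < xs.length ∧ k = s + 1 + (jn : Int) ∧ xs[jn]! = 1) ↔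
          (∃ jn : Nat, jn < (x :: xs).length ∧ k = s + (jn : Int) ∧ (x :: xs)[jn]! = 1) := by
        constructor
        · rintro ⟨jn, h1, h2, h3⟩
          exact ⟨jn + 1, by simpa using h1, by push_cast at h2 ⊢; omega, by simpa using h3⟩
        · rintro ⟨jn, h1, h2, h3⟩
          cases jn with
          | zero => exact absurd (by simpa using h2) hk
          | succ m =>
            exact ⟨m, by simpa using h1, by push_cast at h2 ⊢; omega, by simpa using h3⟩
      by_cases hc : ∃ jn : Nat, jn < (x :: xs).length ∧ k = s + (jn : Int) ∧ (x :: xs)[jn]! = 1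
      · rw [if_pos (hcond.mpr hc), if_pos hc, hstep1]
      · rw [if_neg (fun h => hc (hcond.mp h)), if_neg hc, hstep2]

theorem pvInnerNodup (i : Nat) (xs : List Int) :
    ∀ (s : Int) (d : PySem.Dict Int Int), d.keys.Nodup →
    ((PySem.List.enumerate xs s).foldl
        (fun d (q : Int × Int) => if q.2 = 1 then d.insert q.1 (PySem.Int.bor (d.getD q.1 0) ((1 : Int) <<< i)) else d)
        d).keys.Nodup := by
  induction xs with
  | nil => intro s d h; simpa [PySem.List.enumerate_nil] using h
  | cons x xs ih =>
    intro s d h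
    rw [PySem.List.enumerate_cons, List.foldl_cons]
    apply ih
    split
    · exact PySem.Dict.nodup_keys_insert _ _ _ h
    · exact h

-- the invariant: keys are unique and get? reads off pvColv
theorem pvMasksInv (rows : List (List Int)) (C : Nat)
    (hC : ∀ r ∈ rows, C ≤ r.length) :
    ∀ n, n ≤ rows.length →
      (pvMasks rows C n).keys.Nodup ∧
      ∀ k : Int, (pvMasks rows C n).get? k =
        if 0 ≤ k ∧ k.toNat < C ∧ pvColv rows n k.toNat ≠ 0
        then some (pvColv rows n k.toNat) else none := by
  intro n
  induction n with
  | zero =>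
    intro _
    refine ⟨by simp [pvMasks], ?_⟩
    intro k
    simp [pvMasks, pvColv]
  | succ n ih =>
    intro hn
    obtain ⟨ihnd, ihget⟩ := ih (by omega)
    have hmasks : pvMasks rows C (n + 1) = pvStepB rows C (pvMasks rows C n) n := by
      simp [pvMasks, List.range_succ]
    have hnlt : n < rows.length := by omega
    have hrow : PySem.List.pyGetD rows ((n : Nat) : Int) [] = rows[n] := by
      simp [List.getD_eq_getElem?_getD, hnlt]
    have hCrow : C ≤ rows[n].length := hC _ (List.getElem_mem hnlt)
    have htake : (rows[n].take C).length = C := by simp [hCrow]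
    have hat : ∀ j : Nat, j < C → (pvAt rows n j = 1 ↔ (rows[n].take C)[j]! = 1) := by
      intro j hj
      have hjr : j < rows[n].length := lt_of_lt_of_le hj hCrow
      have : (rows[n].take C)[j]! = rows[n][j] := by
        rw [getElem!_pos _ _ (by simpa [htake] using hj)]
        simp [List.getElem_take]
      rw [this, pvAt, hrow]
      simp [List.getD_eq_getElem?_getD, hjr]
    constructor
    · rw [hmasks]
      exact pvInnerNodup n _ 0 _ ihnd
    · intro k
      rw [hmasks, pvStepB, hrow, pvInnerGet]
      by_cases hc : ∃ jn : Nat, jn < (rows[n].take C).length ∧ k = 0 + (jn : Int) ∧ (rows[n].take C)[jn]! = 1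
      · obtain ⟨jn, hjn, hk, hv⟩ := hc
        have hjnC : jn < C := by omega
        have hk' : k = (jn : Int) := by omega
        subst hk'
        have hat1 : pvAt rows n jn = 1 := (hat jn hjnC).mpr hv
        have hgd : (pvMasks rows C n).getD (jn : Int) 0 = pvColv rows n jn := by
          rw [PySem.Dict.getD_eq_get?_getD, ihget]
          by_cases hz : pvColv rows n jn = 0
          · simp [hz]
          · simp [hjnC, hz]
        rw [if_pos ⟨jn, hjn, by omega, hv⟩, hgd]
        have hcv : pvColv rows (n + 1) jn = PySem.Int.bor (pvColv rows n jn) ((1 : Int) <<< n) := by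
          rw [pvColv_succ, if_pos hat1]
        have hnz : pvColv rows (n + 1) jn ≠ 0 := by
          rw [hcv]; exact (pvBorPos _ _ (pvColv_nonneg rows n jn)).1
        rw [if_pos ⟨Int.natCast_nonneg _, by simpa using hjnC, by simpa using hnz⟩]
        simp [hcv]
      · rw [if_neg hc, ihget]
        by_cases hb : 0 ≤ k ∧ k.toNat < C
        · have hat0 : pvAt rows n k.toNat ≠ 1 := by
            intro h1
            exact hc ⟨k.toNat, by omega, by omega, (hat k.toNat hb.2).mp h1⟩
          have hcv : pvColv rows (n + 1) k.toNat = pvColv rows n k.toNat := by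
            rw [pvColv_succ, if_neg hat0]
          rw [hcv]
        · rw [if_neg (by tauto), if_neg (by tauto)]

-- the port's enumerate/slice fold IS pvMasks
theorem pvMasksBridge (rows : List (List Int)) (C : Nat) :
    (PySem.List.enumerate rows 0).foldl
      (fun (d : PySem.Dict Int Int) p =>
        (PySem.List.enumerate (PySem.List.slice p.2 none (some (C : Int))) 0).foldl
          (fun d (q : Int × Int) =>
            if q.2 = 1 then d.insert q.1 (PySem.Int.bor (d.getD q.1 0) ((1 : Int) <<< p.1.toNat))
            else d)
          d)
      PySem.Dict.empty = pvMasks rows C rows.length := by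
  rw [PySem.List.enumerate_eq_map_pyRange rows ([] : List Int), List.foldl_map]
  have hr : PySem.List.pyRange 0 (PySem.List.len rows) 1
      = List.map (fun (i : Nat) => (i : Int)) (List.range rows.length) := by
    rw [PySem.List.len_eq]; exact PySem.List.pyRange_zero_natCast rows.length
  rw [hr, List.foldl_map]
  unfold pvMasks
  congr 1
  funext d i
  simp [pvStepB, PySem.List.slice_to_natCast, Int.shiftLeft_natCast_right]

-- A's selection fold over any index list, in closed form
theorem pvSel (f : Nat → Int) :
    ∀ (l : List Nat) (acc : List Int × List Int),
    l.foldl (fun (acc : List Int × List Int) j =>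
        if f j ≠ 0 then (acc.1 ++ [f j], acc.2 ++ [(j : Int)]) else acc) acc =
      (acc.1 ++ (l.filter (fun j => decide (f j ≠ 0))).map f,
       acc.2 ++ (l.filter (fun j => decide (f j ≠ 0))).map (fun j => (j : Int))) := by
  intro l
  induction l with
  | nil => intro acc; simp
  | cons j t ih =>
    intro acc
    rw [List.foldl_cons, ih]
    by_cases h : f j ≠ 0 <;> simp [h]

-- ===== VERDICT (by name: the statements are the Claim_ definitions above) =====
-- A's whole column-selection fold in closed form (pvSel at f = pvColv, zeta-normalised)
theorem pvASel (rows : List (List Int)) (C : Nat) :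
    (List.range C).foldl
      (fun (acc : List Int × List Int) j =>
        let v := (List.range rows.length).foldl
          (fun v i => if pvAt rows i j = 1 then PySem.Int.bor v ((1 : Int) <<< i) else v) 0
        if v ≠ 0 then (acc.1 ++ [v], acc.2 ++ [(j : Int)]) else acc)
      ([], [])
    = (((List.range C).filter (fun j => decide (pvColv rows rows.length j ≠ 0))).map
         (fun j => pvColv rows rows.length j),
       ((List.range C).filter (fun j => decide (pvColv rows rows.length j ≠ 0))).map
         (fun (j : Nat) => (j : Int))) := by
  simpa [pvColv, List.map_eq_flatMap] using pvSel (fun j => pvColv rows rows.length j) (List.range C) ([], [])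

theorem get_column_vectors_spec : Claim_equal_get_column_vectors := by
  intro rows _ hpre
  unfold Spec_get_column_vectors get_column_vectors get_column_vectors_alt
  cases rows with
  | nil => simp
  | cons r0 rest =>
    rw [if_neg (List.cons_ne_nil r0 rest), if_neg (List.cons_ne_nil r0 rest)]
    simp only [PySem.List.pyGetD_zero_cons]
    have hC : ∀ r ∈ (r0 :: rest), r0.length ≤ r.length := by
      intro r hr; simpa using hpre r hr
    obtain ⟨hnd, hget⟩ := pvMasksInv (r0 :: rest) r0.length hC (r0 :: rest).length le_rfl
    rw [pvMasksBridge (r0 :: rest) r0.length, pvASel (r0 :: rest) r0.length]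
    have hkeys : PySem.List.sorted (pvMasks (r0 :: rest) r0.length (r0 :: rest).length).keys
        (fun x => x) false
        = ((List.range r0.length).filter
            (fun j => decide (pvColv (r0 :: rest) (r0 :: rest).length j ≠ 0))).map
            (fun (j : Nat) => (j : Int)) := by
      apply PySem.List.sorted_eq_of_perm_of_pairwise_lt
      · rw [List.perm_ext_iff_of_nodup
          (List.Nodup.map (fun a b h => by exact_mod_cast h)
            (List.Nodup.filter _ List.nodup_range)) hnd]
        intro k
        have hmem : k ∈ (pvMasks (r0 :: rest) r0.length (r0 :: rest).length).keys ↔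
            ¬ ((pvMasks (r0 :: rest) r0.length (r0 :: rest).length).get? k = none) := by
          rw [PySem.Dict.get?_eq_none_iff_not_mem_keys]; tauto
        rw [hmem, hget k]
        simp only [List.mem_map, List.mem_filter, List.mem_range, decide_eq_true_eq]
        constructor
        · rintro ⟨j, ⟨hj, hz⟩, rfl⟩
          simp only [List.length_cons] at hz
          simp [hj, hz]
        · intro h
          split at h
          · rename_i hcond
            exact ⟨k.toNat, ⟨hcond.2.1, hcond.2.2⟩, Int.toNat_of_nonneg hcond.1⟩
          · exact absurd rfl h
      · refine List.pairwise_map.mpr ?_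
        exact List.Pairwise.filter _
          ((List.pairwise_lt_range).imp (fun h => by exact_mod_cast h))
    rw [hkeys]
    have hvals : (((List.range r0.length).filter
          (fun j => decide (pvColv (r0 :: rest) (r0 :: rest).length j ≠ 0))).map
          (fun (j : Nat) => (j : Int))).map
        (fun j => (pvMasks (r0 :: rest) r0.length (r0 :: rest).length).getD j 0)
        = ((List.range r0.length).filter
            (fun j => decide (pvColv (r0 :: rest) (r0 :: rest).length j ≠ 0))).map
            (fun j => pvColv (r0 :: rest) (r0 :: rest).length j) := by
      rw [List.map_map]
      apply List.map_congr_left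
      intro j hj
      have hj' : j < r0.length ∧ pvColv (r0 :: rest) (r0 :: rest).length j ≠ 0 := by
        simpa using hj
      simp only [Function.comp]
      rw [PySem.Dict.getD_eq_get?_getD, hget]
      have hz := hj'.2
      simp only [List.length_cons] at hz
      simp [hj'.1, hz]
    rw [hvals]
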